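-- pv_equiv track=rewrite | github.com/DarkLinkGanon/Freight-Tools | app.py | find_column_indexes
-- ===== SOURCE A (Python) =====
-- def normalize_header(text):
--     if text is None:
--         return ""
--     return str(text).strip().lower().replace(" ", "")
--
-- def find_column_indexes(header_row):
--     headers = [normalize_header(x) for x in header_row]
--
--     connote_idx = None
--     amount_idx = None
--     first_comment_idx = None
--
--     for i, header in enumerate(headers):
--         if connote_idx is None and header == "connotecode":
--             connote_idx = i
--         if amount_idx is None and header == "amount":
--             amount_idx = i
--         if first_comment_idx is None and header == "comment":
--             first_comment_idx = i
--
--     return connote_idx, amount_idx, first_comment_idx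
-- ===== SOURCE B (Python) =====
-- def normalize_header(text):
--     if text is None:
--         return ""
--     return str(text).strip().lower().replace(" ", "")
--
-- def find_column_indexes(header_row):
--     headers = [normalize_header(x) for x in header_row]
--
--     def idx(name):
--         try:
--             return headers.index(name)
--         except ValueError:
--             return None
--
--     return idx("connotecode"), idx("amount"), idx("comment")
-- ===== Notes on version B (the rewrite author's own statement) =====
-- stated objective: simpler
-- what changed: B replaces A's single scan carrying three None-guarded accumulators with three independent staged searches via list.index (ValueError mapped to None), so no accumulator state is threaded at all.
import Mathlib
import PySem

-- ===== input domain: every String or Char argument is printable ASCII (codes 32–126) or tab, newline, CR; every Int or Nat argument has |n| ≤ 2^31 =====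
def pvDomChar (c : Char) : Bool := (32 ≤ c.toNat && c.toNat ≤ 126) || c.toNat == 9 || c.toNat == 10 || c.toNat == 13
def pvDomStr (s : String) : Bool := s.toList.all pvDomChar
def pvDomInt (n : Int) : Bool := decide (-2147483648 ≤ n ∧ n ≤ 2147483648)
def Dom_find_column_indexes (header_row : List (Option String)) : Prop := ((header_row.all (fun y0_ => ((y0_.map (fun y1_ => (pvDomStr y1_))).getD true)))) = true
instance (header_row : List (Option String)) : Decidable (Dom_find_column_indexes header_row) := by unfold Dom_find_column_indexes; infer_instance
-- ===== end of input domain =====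

-- B does three independent list.index searches on the normalized headers (ValueError -> None) instead of A's single scan threading three None-guarded accumulators; simpler, same O(n) cost.

-- ===== PORT A =====
def normalize_header (text : Option String) : String :=
  match text with
  | none => ""
  | some s => PySem.Str.replace (PySem.Str.lower (PySem.Str.strip s)) " " ""

def find_column_indexes (header_row : List (Option String)) : Option Int × Option Int × Option Int :=
  let headers := header_row.map normalize_header
  (PySem.List.enumerate headers).foldl
    (fun (st : Option Int × Option Int × Option Int) p =>
      let c := if st.1 = none ∧ p.2 = "connotecode" then some p.1 else st.1
      let a := if st.2.1 = none ∧ p.2 = "amount" then some p.1 else st.2.1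
      let m := if st.2.2 = none ∧ p.2 = "comment" then some p.1 else st.2.2
      (c, a, m))
    (none, none, none)

-- ===== PORT B =====
-- headers.index(name) with ValueError -> None: PySem.List.index? (none = not found)
def fciIdx (headers : List String) (name : String) : Option Int :=
  (PySem.List.index? headers name).map (fun n => (n : Int))

def find_column_indexes_alt (header_row : List (Option String)) : Option Int × Option Int × Option Int :=
  let headers := header_row.map normalize_header
  (fciIdx headers "connotecode", fciIdx headers "amount", fciIdx headers "comment")

-- ===== PRECONDITION & SPEC =====
def Spec_find_column_indexes (header_row : List (Option String)) (out : Option Int × Option Int × Option Int) : Prop := out = find_column_indexes_alt header_row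
instance (header_row : List (Option String)) (out : Option Int × Option Int × Option Int) : Decidable (Spec_find_column_indexes header_row out) := by unfold Spec_find_column_indexes; infer_instance

-- ===== CLAIM =====
def Claim_equal_find_column_indexes : Prop := ∀ (header_row : List (Option String)), Dom_find_column_indexes header_row → Spec_find_column_indexes header_row (find_column_indexes header_row)

-- ===== LEMMAS AND PROOFS =====

-- first-match accumulator for a single key over (index, header) pairs
def firstAcc (k : String) (ps : List (Int × String)) (acc : Option Int) : Option Int :=
  ps.foldl (fun acc p => if acc = none ∧ p.2 = k then some p.1 else acc) acc

-- A's triple fold decomposes into three independent first-match folds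
theorem tripleFold_eq (ps : List (Int × String)) (c a m : Option Int) :
    ps.foldl
      (fun (st : Option Int × Option Int × Option Int) p =>
        ((if st.1 = none ∧ p.2 = "connotecode" then some p.1 else st.1),
         (if st.2.1 = none ∧ p.2 = "amount" then some p.1 else st.2.1),
         (if st.2.2 = none ∧ p.2 = "comment" then some p.1 else st.2.2)))
      (c, a, m)
    = (firstAcc "connotecode" ps c, firstAcc "amount" ps a, firstAcc "comment" ps m) := by
  induction ps generalizing c a m with
  | nil => rfl
  | cons p ps ih => simp only [List.foldl_cons, firstAcc] at *; exact ih _ _ _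

-- an already-set accumulator never changes
theorem firstAcc_some (k : String) (ps : List (Int × String)) (v : Int) :
    firstAcc k ps (some v) = some v := by
  induction ps with
  | nil => rfl
  | cons p ps ih => simp only [firstAcc, List.foldl_cons] at *; simpa using ih

-- the first-match fold over an enumeration is list.index
theorem firstAcc_enumerate (k : String) (l : List String) (s : Int) :
    firstAcc k (PySem.List.enumerate l s) none
      = (PySem.List.index? l k).map (fun n => s + (n : Int)) := by
  induction l generalizing s with
  | nil => rfl
  | cons x xs ih =>
      rw [PySem.List.enumerate_cons]
      simp only [firstAcc, List.foldl_cons]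
      by_cases hx : x = k
      · rw [if_pos (by simp [hx]), hx]
        rw [show List.foldl (fun acc p => if acc = none ∧ p.2 = k then some p.1 else acc) (some s) (PySem.List.enumerate xs (s+1)) = firstAcc k (PySem.List.enumerate xs (s+1)) (some s) from rfl,
            firstAcc_some, PySem.List.index?_cons_self]
        simp
      · rw [if_neg (by simp [hx])]
        rw [show List.foldl (fun acc p => if acc = none ∧ p.2 = k then some p.1 else acc) none (PySem.List.enumerate xs (s+1)) = firstAcc k (PySem.List.enumerate xs (s+1)) none from rfl,
            ih, PySem.List.index?_cons_of_ne _ hx]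
        cases PySem.List.index? xs k <;> simp <;> ring

theorem fci_eq (header_row : List (Option String)) :
    find_column_indexes header_row = find_column_indexes_alt header_row := by
  unfold find_column_indexes find_column_indexes_alt fciIdx
  rw [tripleFold_eq]
  simp only [firstAcc_enumerate]
  cases PySem.List.index? (header_row.map normalize_header) "connotecode" <;>
  cases PySem.List.index? (header_row.map normalize_header) "amount" <;>
  cases PySem.List.index? (header_row.map normalize_header) "comment" <;> simp

-- ===== VERDICT =====
theorem find_column_indexes_spec : Claim_equal_find_column_indexes := by
  intro hr _
  unfold Spec_find_column_indexes
  exact fci_eq hr
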